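-- pv_equiv track=rewrite | github.com/elimoss/wellread | src/curator.py | group_by_relevance
-- ===== SOURCE A (Python) =====
-- from typing import List, Dict, Any
--
-- def group_by_relevance(curated_items: List[Dict[str, Any]]) -> Dict[str, List[Dict[str, Any]]]:
--     """Group items by relevance level (high, medium, low)."""
--     # Using semantic similarity scores (0-100)
--     high_relevance = [item for item in curated_items if item['relevanceScore'] >= 70]
--     medium_relevance = [item for item in curated_items if 40 <= item['relevanceScore'] < 70]
--     low_relevance = [item for item in curated_items if item['relevanceScore'] < 40]
--
--     return {
--         'high': high_relevance,
--         'medium': medium_relevance,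
--         'low': low_relevance
--     }
-- ===== SOURCE B (Python) =====
-- from typing import List, Dict, Any
--
-- def group_by_relevance(curated_items: List[Dict[str, Any]]) -> Dict[str, List[Dict[str, Any]]]:
--     """Group items by relevance level (high, medium, low) in a single pass."""
--     groups = {'high': [], 'medium': [], 'low': []}
--     for item in curated_items:
--         score = item['relevanceScore']
--         if score >= 70:
--             groups['high'].append(item)
--         elif score >= 40:
--             groups['medium'].append(item)
--         else:
--             groups['low'].append(item)
--     return groups
-- ===== Notes on version B (the rewrite author's own statement) =====
-- stated objective: simpler
-- what changed: Three separate filtering scans over curated_items are replaced by one classifying pass that appends each item to its bucket via an if/elif/else on the score.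
import Mathlib
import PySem

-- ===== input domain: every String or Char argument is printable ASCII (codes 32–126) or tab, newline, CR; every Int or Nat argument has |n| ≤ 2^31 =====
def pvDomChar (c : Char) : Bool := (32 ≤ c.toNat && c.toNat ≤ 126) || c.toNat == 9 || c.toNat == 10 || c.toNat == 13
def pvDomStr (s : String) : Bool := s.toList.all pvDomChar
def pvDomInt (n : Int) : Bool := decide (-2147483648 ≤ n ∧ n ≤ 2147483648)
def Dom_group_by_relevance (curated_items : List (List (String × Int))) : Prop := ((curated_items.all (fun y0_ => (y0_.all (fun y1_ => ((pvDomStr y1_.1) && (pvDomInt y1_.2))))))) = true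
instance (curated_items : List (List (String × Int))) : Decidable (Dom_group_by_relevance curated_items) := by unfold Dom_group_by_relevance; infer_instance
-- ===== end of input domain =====

-- B replaces A's three filtering scans by a single classifying pass (if/elif/else) appending
-- each item to its bucket; objective: simpler (one pass, same result).

-- ===== PORT A =====
-- item['relevanceScore']: first-match lookup; Pre_ guarantees the key is present, so getD 0 is exact there.
def pvScore (item : List (String × Int)) : Int :=
  ((PySem.Dict.mk item).get? "relevanceScore").getD 0

def group_by_relevance (curated_items : List (List (String × Int))) : List (String × List (List (String × Int))) :=
  let high_relevance := curated_items.filter (fun item => decide (pvScore item ≥ 70))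
  let medium_relevance := curated_items.filter (fun item => decide (40 ≤ pvScore item ∧ pvScore item < 70))
  let low_relevance := curated_items.filter (fun item => decide (pvScore item < 40))
  [("high", high_relevance), ("medium", medium_relevance), ("low", low_relevance)]

-- ===== PORT B =====
-- one pass: fold over the items, appending each to its bucket
def pvClassify (acc : List (List (String × Int)) × List (List (String × Int)) × List (List (String × Int)))
    (item : List (String × Int)) :
    List (List (String × Int)) × List (List (String × Int)) × List (List (String × Int)) :=
  let s := pvScore item
  if s ≥ 70 then (acc.1 ++ [item], acc.2.1, acc.2.2)
  else if s ≥ 40 then (acc.1, acc.2.1 ++ [item], acc.2.2)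
  else (acc.1, acc.2.1, acc.2.2 ++ [item])

def group_by_relevance_alt (curated_items : List (List (String × Int))) : List (String × List (List (String × Int))) :=
  let groups := curated_items.foldl pvClassify ([], [], [])
  [("high", groups.1), ("medium", groups.2.1), ("low", groups.2.2)]

-- ===== PRECONDITION & SPEC =====
-- Pre_ excludes items without a 'relevanceScore' key, where Python A (and B) raise KeyError.
def Pre_group_by_relevance (curated_items : List (List (String × Int))) : Prop :=
  ∀ item ∈ curated_items, item.any (fun kv => kv.1 == "relevanceScore")
instance (curated_items : List (List (String × Int))) : Decidable (Pre_group_by_relevance curated_items) := by unfold Pre_group_by_relevance; infer_instance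
def pvWitness_group_by_relevance : (List (List (String × Int))) :=
  [[("relevanceScore", 80)], [("relevanceScore", 50), ("x", 1)], [("relevanceScore", 10)]]

def Spec_group_by_relevance (curated_items : List (List (String × Int))) (out : List (String × List (List (String × Int)))) : Prop := out = group_by_relevance_alt curated_items
instance (curated_items : List (List (String × Int))) (out : List (String × List (List (String × Int)))) : Decidable (Spec_group_by_relevance curated_items out) := by unfold Spec_group_by_relevance; infer_instance

-- ===== CLAIM (what is proved, stated in full; the proofs are below) =====
def Claim_equal_group_by_relevance : Prop := ∀ (curated_items : List (List (String × Int))), Dom_group_by_relevance curated_items → Pre_group_by_relevance curated_items → Spec_group_by_relevance curated_items (group_by_relevance curated_items)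

-- ===== LEMMAS AND PROOFS =====
theorem pvClassify_foldl (xs : List (List (String × Int)))
    (h m l : List (List (String × Int))) :
    xs.foldl pvClassify (h, m, l) =
      (h ++ xs.filter (fun item => decide (pvScore item ≥ 70)),
       m ++ xs.filter (fun item => decide (40 ≤ pvScore item ∧ pvScore item < 70)),
       l ++ xs.filter (fun item => decide (pvScore item < 40))) := by
  induction xs generalizing h m l with
  | nil => simp
  | cons x xs ih =>
    simp only [List.foldl_cons, List.filter_cons, pvClassify]
    split_ifs with h1 h2 <;> rw [ih] <;>
      simp_all <;> omega

-- ===== VERDICT (by name: the statement is the Claim_ definition above) =====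
theorem group_by_relevance_spec : Claim_equal_group_by_relevance := by
  intro xs _ _
  show _ = _
  simp [group_by_relevance, group_by_relevance_alt, pvClassify_foldl]
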